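-- pv_equiv track=rewrite | github.com/binary-1024/maven_comp_manager | utils/version_resolving.py | ljust_dot_zero
-- ===== SOURCE A (Python) =====
-- def ljust_dot_zero(str_:str, max_dot_count_):
--     '''
--     按照 max_dot_count_ 来对齐 str_ 的 "." 号数量, 如果 str_ 的 "." 号数量小于 max_dot_count_ 那么就补充 ".0"
--     '''
--     if str_[-1] == '.':
--         # 如果最后一个字符是 "." 那么我们就要去掉最后一个 "." 然后开始补充
--         str_ = str_[:-1]
--     existing_dot_count = str_.count('.')
--     while(existing_dot_count < max_dot_count_):
--         str_ += '.0'
--         existing_dot_count += 1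
--     return str_
-- ===== SOURCE B (Python) =====
-- def ljust_dot_zero(str_: str, max_dot_count_):
--     if str_[-1] == '.':
--         str_ = str_[:-1]
--     return str_ + '.0' * (max_dot_count_ - str_.count('.'))
-- ===== Notes on version B (the rewrite author's own statement) =====
-- stated objective: idiomatic
-- what changed: Replaces the counter-driven while loop that appends '.0' one step at a time with a closed-form construction: compute the number of missing dots once and build the padding with a single string multiplication.
import Mathlib
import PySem

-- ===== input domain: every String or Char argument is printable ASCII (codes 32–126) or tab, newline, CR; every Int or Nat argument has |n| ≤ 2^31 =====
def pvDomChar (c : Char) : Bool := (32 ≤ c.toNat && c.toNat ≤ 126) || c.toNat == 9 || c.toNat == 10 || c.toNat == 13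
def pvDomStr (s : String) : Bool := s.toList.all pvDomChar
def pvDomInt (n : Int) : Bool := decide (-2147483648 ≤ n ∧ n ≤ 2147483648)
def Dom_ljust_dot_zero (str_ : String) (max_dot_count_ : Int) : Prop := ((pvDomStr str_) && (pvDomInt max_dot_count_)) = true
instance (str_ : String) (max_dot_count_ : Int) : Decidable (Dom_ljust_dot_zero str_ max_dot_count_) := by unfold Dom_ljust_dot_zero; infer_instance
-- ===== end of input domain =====

-- B builds the '.0' padding in one closed-form construction instead of A's counter-driven append loop (same cost; return-value equivalence).

-- ===== PORT A =====
-- the while loop: while existing_dot_count < max_dot_count_: str_ += '.0'; existing_dot_count += 1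
def ljustLoop (s : String) (c : Int) (m : Int) : String :=
  if c < m then ljustLoop (s ++ ".0") (c + 1) m else s
termination_by (m - c).toNat
decreasing_by omega

def ljust_dot_zero (str_ : String) (max_dot_count_ : Int) : String :=
  let s := if PySem.Str.pyGet? str_ (-1) = some '.' then PySem.Str.slice str_ none (some (-1)) else str_
  ljustLoop s ((PySem.Str.count s ".") : Int) max_dot_count_

-- ===== PORT B =====
def ljust_dot_zero_alt (str_ : String) (max_dot_count_ : Int) : String :=
  let s := if PySem.Str.pyGet? str_ (-1) = some '.' then PySem.Str.slice str_ none (some (-1)) else str_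
  s ++ String.join (List.replicate (max_dot_count_ - ((PySem.Str.count s ".") : Int)).toNat ".0")

-- ===== PRECONDITION & SPEC =====
-- A evaluates str_[-1], which raises IndexError on the empty string; Pre_ excludes exactly that.
def Pre_ljust_dot_zero (str_ : String) (max_dot_count_ : Int) : Prop := str_ ≠ ""
instance (str_ : String) (max_dot_count_ : Int) : Decidable (Pre_ljust_dot_zero str_ max_dot_count_) := by unfold Pre_ljust_dot_zero; infer_instance
def pvWitness_ljust_dot_zero : String × Int := ("1.2", 3)

def Spec_ljust_dot_zero (str_ : String) (max_dot_count_ : Int) (out : String) : Prop := out = ljust_dot_zero_alt str_ max_dot_count_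
instance (str_ : String) (max_dot_count_ : Int) (out : String) : Decidable (Spec_ljust_dot_zero str_ max_dot_count_ out) := by unfold Spec_ljust_dot_zero; infer_instance

-- ===== CLAIM (what is proved, stated in full; the proofs are below) =====
def Claim_equal_ljust_dot_zero : Prop := ∀ (str_ : String) (max_dot_count_ : Int), Dom_ljust_dot_zero str_ max_dot_count_ → Pre_ljust_dot_zero str_ max_dot_count_ → Spec_ljust_dot_zero str_ max_dot_count_ (ljust_dot_zero str_ max_dot_count_)

-- ===== LEMMAS AND PROOFS =====
theorem foldl_strAppend_shift (l : List String) : ∀ (a : String),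
    List.foldl (fun r s => r ++ s) a l = a ++ List.foldl (fun r s => r ++ s) "" l := by
  induction l with
  | nil => intro a; simp
  | cons x xs ih =>
    intro a
    simp only [List.foldl_cons]
    rw [ih (a ++ x), ih ("" ++ x), String.append_assoc]
    simp

theorem ljustLoop_eq (n : Nat) : ∀ (s : String) (c m : Int), (m - c).toNat = n →
    ljustLoop s c m = s ++ String.join (List.replicate n ".0") := by
  induction n with
  | zero =>
    intro s c m h
    rw [ljustLoop]
    rw [if_neg (by omega)]
    simp [String.join]
  | succ k ih =>
    intro s c m h
    rw [ljustLoop, if_pos (by omega)]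
    rw [ih (s ++ ".0") (c + 1) m (by omega)]
    rw [List.replicate_succ]
    simp only [String.join, List.foldl_cons]
    rw [foldl_strAppend_shift (List.replicate k ".0") ("" ++ ".0"), String.append_assoc]
    simp

theorem ljust_dot_zero_spec : Claim_equal_ljust_dot_zero := by
  intro str_ m _ _
  unfold Spec_ljust_dot_zero ljust_dot_zero ljust_dot_zero_alt
  exact ljustLoop_eq _ _ _ _ rfl
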